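-- pv_equiv track=rewrite | github.com/Rishabh5903/Competitive_Programming | Codechef/starters 102/starters 112b/e.py | solve
-- ===== SOURCE A (Python) =====
-- from math import sqrt,ceil,floor,lcm,gcd
--
-- def solve(n,l):
--         l.sort()
--         # if(s==0):
--         if(n==2):
--             return(l[1])
--             # continue
--
--         ans=0
--         for i in range(ceil(n/2)):
--             ans+=l[i]
--         if(n%2==0):
--             ans-=l[0]
--             ans+=l[n//2]
--         return (ans)
-- ===== SOURCE B (Python) =====
-- def solve(n, l):
--     # three-way-partition quickselect: sum of the k smallest without sorting
--     def sum_smallest(xs, k):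
--         if k <= 0:
--             return 0
--         if k >= len(xs):
--             return sum(xs)
--         p = xs[0]
--         lt = [x for x in xs if x < p]
--         gt = [x for x in xs if x > p]
--         ne = len(xs) - len(lt) - len(gt)   # multiplicity of the pivot
--         if k <= len(lt):
--             return sum_smallest(lt, k)
--         if k <= len(lt) + ne:
--             return sum(lt) + p * (k - len(lt))
--         return sum(lt) + p * ne + sum_smallest(gt, k - len(lt) - ne)
--     if n % 2 == 0:
--         return sum_smallest(l, n // 2 + 1) - min(l)
--     return sum_smallest(l, (n + 1) // 2)
-- ===== Notes on version B (the rewrite author's own statement) =====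
-- stated objective: alternative
-- what changed: Replaces sort-then-index-loop by a three-way-partition quickselect that computes the sum of the k smallest elements recursively without ever sorting (k = n//2+1 minus the minimum for even n, (n+1)//2 for odd n); B does not mutate l (A sorts it in place; equivalence is about the return value).
-- outside the precondition, e.g. on solve(-2, [1, 2]): A returns 1, B returns -1
import Mathlib
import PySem

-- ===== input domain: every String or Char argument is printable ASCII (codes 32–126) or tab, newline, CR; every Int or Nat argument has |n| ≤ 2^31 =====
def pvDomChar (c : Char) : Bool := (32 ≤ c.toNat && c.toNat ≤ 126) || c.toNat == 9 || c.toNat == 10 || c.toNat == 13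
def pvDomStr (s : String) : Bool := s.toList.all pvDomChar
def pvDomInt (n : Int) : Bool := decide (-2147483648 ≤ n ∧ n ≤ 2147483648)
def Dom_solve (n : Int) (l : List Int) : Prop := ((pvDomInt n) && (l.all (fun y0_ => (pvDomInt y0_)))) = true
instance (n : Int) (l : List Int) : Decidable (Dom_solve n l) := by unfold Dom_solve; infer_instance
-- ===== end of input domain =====

-- B computes the sum of the k smallest elements by a three-way-partition quickselect recursion
-- instead of sorting (alternative algorithm, same value); A sorts l in place, B does not — the
-- claim is about the return value only.

-- ===== PORT A =====
def solve (n : Int) (l : List Int) : Int :=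
  let s := PySem.List.sorted l (fun x => x) false    -- l.sort()
  if n == 2 then PySem.List.pyGetD s 1 0
  else
    -- math.ceil(n/2) = -((-n) // 2); exact on Dom (|n| ≤ 2^31, the float is exact)
    let ans := (PySem.List.pyRange 0 (-(PySem.Int.floordiv (-n) 2)) 1).foldl
      (fun a i => a + PySem.List.pyGetD s i 0) 0
    if PySem.Int.mod n 2 == 0 then
      ans - PySem.List.pyGetD s 0 0 + PySem.List.pyGetD s (PySem.Int.floordiv n 2) 0
    else ans

-- ===== PORT B =====
-- sum_smallest(xs, k): partition around the pivot xs[0] into <, ==, >, recurse into the side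
-- that holds the k-th smallest
def sumSmallest (xs : List Int) (k : Int) : Int :=
  if k ≤ 0 then 0
  else if (xs.length : Int) ≤ k then xs.sum
  else
    match xs with
    | [] => 0
    | p :: t =>
      let lt := (p :: t).filter (fun x => decide (x < p))
      let gt := (p :: t).filter (fun x => decide (p < x))
      let ne : Int := ((p :: t).length : Int) - lt.length - gt.length
      if k ≤ (lt.length : Int) then sumSmallest lt k
      else if k ≤ (lt.length : Int) + ne then lt.sum + p * (k - lt.length)
      else lt.sum + p * ne + sumSmallest gt (k - lt.length - ne)
termination_by xs.length
decreasing_by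
  · show (List.filter (fun x => decide (x < p)) (p :: t)).length < (p :: t).length
    rw [List.filter_cons_of_neg (by simp)]
    exact Nat.lt_succ_of_le (List.length_filter_le _ _)
  · show (List.filter (fun x => decide (p < x)) (p :: t)).length < (p :: t).length
    rw [List.filter_cons_of_neg (by simp)]
    exact Nat.lt_succ_of_le (List.length_filter_le _ _)

def solve_alt (n : Int) (l : List Int) : Int :=
  if PySem.Int.mod n 2 == 0 then
    sumSmallest l (PySem.Int.floordiv n 2 + 1)
      - (PySem.List.min? l (fun x => x)).getD 0        -- min(l); on [] Python raises (outside Pre_)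
  else sumSmallest l (PySem.Int.floordiv (n + 1) 2)

-- ===== PRECONDITION & SPEC =====
-- Pre_ is exactly where A returns normally, except that it also excludes even n < 0 (on which A's
-- value arises from negative-index wraparound of l[0]/l[n//2], an artefact of A's implementation);
-- everywhere else outside Pre_ A raises IndexError.
def Pre_solve (n : Int) (l : List Int) : Prop :=
  (n % 2 = 1 → (n + 1) / 2 ≤ (l.length : Int)) ∧
  (n % 2 = 0 → 0 ≤ n ∧ 1 ≤ (l.length : Int) ∧ n / 2 < (l.length : Int))
instance (n : Int) (l : List Int) : Decidable (Pre_solve n l) := by unfold Pre_solve; infer_instance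
def pvWitness_solve : Int × List Int := (3, [5, 1, 2])
def Spec_solve (n : Int) (l : List Int) (out : Int) : Prop := out = solve_alt n l
instance (n : Int) (l : List Int) (out : Int) : Decidable (Spec_solve n l out) := by unfold Spec_solve; infer_instance

-- ===== CLAIM (what is proved, stated in full; the proofs are below) =====
def Claim_equal_solve : Prop := ∀ (n : Int) (l : List Int), Dom_solve n l → Pre_solve n l → Spec_solve n l (solve n l)

-- ===== LEMMAS AND PROOFS =====

-- (List.range t).map (fun j => s.getD (a+j) 0) is the window of s starting at a
lemma map_getD_range_off (s : List Int) (a t : Nat) (h : a + t ≤ s.length) :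
    (List.range t).map (fun j => s.getD (a + j) 0) = (s.drop a).take t := by
  apply List.ext_getElem
  · simp; omega
  · intro i h1 h2
    simp only [List.getElem_map, List.getElem_range, List.getElem_take, List.getElem_drop]
    rw [List.getD_eq_getElem _ _ (by simp at h1 ⊢; omega)]

-- A's index map over range(a, a+t), Nat offsets
lemma map_window (s : List Int) (a t : Nat) (h : a + t ≤ s.length) :
    (PySem.List.pyRange (a : Int) ((a : Int) + (t : Int)) 1).map (fun i => PySem.List.pyGetD s i 0)
      = (s.drop a).take t := by
  rw [PySem.List.pyRange_one, List.map_map]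
  have hc : ((fun i => PySem.List.pyGetD s i 0) ∘ fun k : Nat => ((a : Int) + k))
      = fun j : Nat => s.getD (a + j) 0 := by
    funext j
    show PySem.List.pyGetD s ((a : Int) + (j : Int)) 0 = s.getD (a + j) 0
    rw [show ((a : Int) + (j : Int)) = ((a + j : Nat) : Int) by push_cast; ring,
      PySem.List.pyGetD_natCast]
  rw [show ((a : Int) + (t : Int) - (a : Int)).toNat = t by omega, hc]
  exact map_getD_range_off s a t h

-- A's index map over range(a, b), Int bounds
lemma map_window' (s : List Int) (a b : Int) (h0 : 0 ≤ a) (h : b ≤ (s.length : Int)) :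
    (PySem.List.pyRange a b 1).map (fun i => PySem.List.pyGetD s i 0)
      = (s.drop a.toNat).take (b - a).toNat := by
  by_cases hab : a ≤ b
  · obtain ⟨an, rfl⟩ := Int.eq_ofNat_of_zero_le h0
    obtain ⟨tn, rfl⟩ : ∃ tn : Nat, b = ((an : Nat) : Int) + ((tn : Nat) : Int) :=
      ⟨(b - an).toNat, by omega⟩
    rw [map_window s an tn (by omega), Int.toNat_natCast]
    congr 1
    omega
  · rw [PySem.List.pyRange_one_eq_nil (by omega), show (b - a).toNat = 0 by omega]
    simp

-- A's accumulation loop is the sum of the first t elements of the sorted list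
lemma loop_eq_sum_take' (s : List Int) (t : Int) (h : t ≤ (s.length : Int)) :
    (PySem.List.pyRange 0 t 1).foldl (fun a i => a + PySem.List.pyGetD s i 0) 0
      = (s.take t.toNat).sum := by
  rw [PySem.List.foldl_add, map_window' s 0 t (le_refl 0) h]
  simp

-- B's three-way partition is a permutation of the list
lemma part3_perm (p : Int) (xs : List Int) :
    ((xs.filter (fun x => decide (x < p))) ++ ((xs.filter (fun x => x == p)) ++ (xs.filter (fun x => decide (p < x))))).Perm xs := by
  have h2 := List.filter_append_perm (fun x => x == p) (xs.filter (fun x => !decide (x < p)))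
  rw [List.filter_filter, List.filter_filter] at h2
  have e1 : (fun a => (a == p) && !decide (a < p)) = (fun a : Int => a == p) := by
    funext a; by_cases h : a = p <;> simp [h]
  have e2 : (fun a => (!(a == p)) && !decide (a < p)) = (fun a : Int => decide (p < a)) := by
    funext a
    rcases lt_trichotomy a p with h|h|h
    · simp [h, not_lt.mpr h.le]
    · simp [h]
    · simp [h, h.ne', not_lt.mpr h.le]
  rw [e1, e2] at h2
  exact (List.Perm.append_left _ h2).trans (List.filter_append_perm _ xs)

-- sorting splits along the three-way partition
lemma sorted_decomp (p : Int) (xs : List Int) :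
    PySem.List.sorted xs (fun x => x) false
      = PySem.List.sorted (xs.filter (fun x => decide (x < p))) (fun x => x) false
        ++ xs.filter (fun x => x == p)
        ++ PySem.List.sorted (xs.filter (fun x => decide (p < x))) (fun x => x) false := by
  apply PySem.List.sorted_id_eq_of_perm_of_pairwise
  · have hA := PySem.List.sorted_perm (xs.filter (fun x => decide (x < p))) (fun x : Int => x) false
    have hB := PySem.List.sorted_perm (xs.filter (fun x => decide (p < x))) (fun x : Int => x) false
    refine List.Perm.trans ?_ (part3_perm p xs)
    rw [← List.append_assoc]
    exact ((hA.append (List.Perm.refl _)).append hB)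
  · have hmemA : ∀ x ∈ PySem.List.sorted (xs.filter (fun x => decide (x < p))) (fun x => x) false, x < p := by
      intro x hx
      rw [PySem.List.mem_sorted] at hx
      simpa using (List.mem_filter.mp hx).2
    have hmemE : ∀ x ∈ xs.filter (fun x => x == p), x = p := by
      intro x hx
      simpa using (List.mem_filter.mp hx).2
    have hmemB : ∀ x ∈ PySem.List.sorted (xs.filter (fun x => decide (p < x))) (fun x => x) false, p < x := by
      intro x hx
      rw [PySem.List.mem_sorted] at hx
      simpa using (List.mem_filter.mp hx).2
    rw [List.pairwise_append, List.pairwise_append]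
    refine ⟨⟨PySem.List.sorted_pairwise _ _, ?_, ?_⟩, PySem.List.sorted_pairwise _ _, ?_⟩
    · exact List.pairwise_of_forall_mem_list (fun a ha b hb => by
        rw [hmemE a ha, hmemE b hb])
    · intro a ha b hb
      exact le_of_lt (lt_of_lt_of_le (hmemA a ha) (le_of_eq (hmemE b hb).symm))
    · intro a ha b hb
      rcases List.mem_append.mp ha with h | h
      · exact le_of_lt (lt_of_lt_of_le (hmemA a h) (le_of_lt (hmemB b hb)))
      · exact le_of_lt (lt_of_le_of_lt (le_of_eq (hmemE a h)) (hmemB b hb))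

-- B's quickselect recursion computes the sum of the k smallest = the sorted prefix sum
lemma sumSmallest_eq (xs : List Int) (k : Int) :
    sumSmallest xs k = ((PySem.List.sorted xs (fun x => x) false).take k.toNat).sum := by
  suffices H : ∀ N, ∀ xs : List Int, xs.length ≤ N → ∀ k : Int,
      sumSmallest xs k = ((PySem.List.sorted xs (fun x => x) false).take k.toNat).sum from
    H xs.length xs le_rfl k
  intro N
  induction N with
  | zero =>
    intro xs hN k
    have hnil : xs = [] := List.eq_nil_of_length_eq_zero (Nat.le_zero.mp hN)
    subst hnil
    rw [sumSmallest]
    split_ifs <;> simp [PySem.List.sorted]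
  | succ N ih =>
    intro xs hN k
    by_cases hk0 : k ≤ 0
    · rw [sumSmallest.eq_def, if_pos hk0, show k.toNat = 0 by omega]
      simp
    by_cases hlen : (xs.length : Int) ≤ k
    · rw [sumSmallest.eq_def, if_neg hk0, if_pos hlen,
        List.take_of_length_le (by rw [PySem.List.length_sorted]; omega)]
      exact ((PySem.List.sorted_perm xs (fun x => x) false).sum_eq).symm
    rcases xs with _ | ⟨p, t⟩
    · simp at hlen; omega
    rw [sumSmallest.eq_def, if_neg hk0, if_neg hlen]
    simp only []
    set L := (p :: t).filter (fun x => decide (x < p)) with hL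
    set G := (p :: t).filter (fun x => decide (p < x)) with hG
    set E := (p :: t).filter (fun x => x == p) with hE
    have hLt : L = t.filter (fun x => decide (x < p)) := by
      rw [hL, List.filter_cons_of_neg (by simp)]
    have hGt : G = t.filter (fun x => decide (p < x)) := by
      rw [hG, List.filter_cons_of_neg (by simp)]
    have hLN : L.length ≤ N := by
      rw [hLt]; have := List.length_filter_le (fun x => decide (x < p)) t
      simp at hN; omega
    have hGN : G.length ≤ N := by
      rw [hGt]; have := List.length_filter_le (fun x => decide (p < x)) t
      simp at hN; omega
    have hlen3 : (p :: t).length = L.length + (E.length + G.length) := by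
      have h := (part3_perm p (p :: t)).length_eq
      simp only [List.length_append] at h
      simp only [← hL, ← hE, ← hG] at h ⊢
      omega
    have hErep : E = List.replicate E.length p := by
      rw [List.eq_replicate_iff]
      exact ⟨rfl, fun b hb => by simpa using (List.mem_filter.mp hb).2⟩
    have hdec := sorted_decomp p (p :: t)
    simp only [← hL, ← hE, ← hG] at hdec
    have hlenA : (PySem.List.sorted L (fun x => x) false).length = L.length :=
      PySem.List.length_sorted _ _ _
    have hsumA : (PySem.List.sorted L (fun x => x) false).sum = L.sum :=
      (PySem.List.sorted_perm L (fun x => x) false).sum_eq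
    rw [hdec]
    by_cases h1 : k ≤ (L.length : Int)
    · rw [if_pos h1, List.take_append, List.take_append]
      rw [show k.toNat - ((PySem.List.sorted L (fun x => x) false) ++ E).length = 0 by
        simp only [List.length_append, hlenA]; omega]
      rw [show k.toNat - (PySem.List.sorted L (fun x => x) false).length = 0 by omega]
      simp only [List.take_zero, List.append_nil]
      exact ih L hLN k
    rw [if_neg h1]
    have hne : ((p :: t).length : Int) - (L.length : Int) - (G.length : Int) = (E.length : Int) := by
      simp only [List.length_cons] at hlen3 ⊢
      omega
    have hAfull : (PySem.List.sorted L (fun x => x) false).take k.toNat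
        = PySem.List.sorted L (fun x => x) false :=
      List.take_of_length_le (by omega)
    by_cases h2 : k ≤ (L.length : Int) + (((p :: t).length : Int) - (L.length : Int) - (G.length : Int))
    · rw [if_pos h2]
      rw [hne] at h2
      rw [List.take_append, List.take_append]
      rw [show k.toNat - ((PySem.List.sorted L (fun x => x) false) ++ E).length = 0 by
        simp only [List.length_append, hlenA]; omega]
      simp only [List.take_zero, List.append_nil, hAfull, List.sum_append, hsumA]
      rw [hErep, List.take_replicate, List.sum_replicate]
      rw [show min (k.toNat - (PySem.List.sorted L (fun x => x) false).length) E.length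
          = k.toNat - L.length by omega]
      rw [nsmul_eq_mul]
      rw [show ((k.toNat - L.length : Nat) : Int) = k - L.length by omega]
      ring
    · rw [if_neg h2, hne]
      rw [hne] at h2
      rw [List.take_append, List.take_append]
      rw [List.take_of_length_le (show E.length ≤ k.toNat - (PySem.List.sorted L (fun x => x) false).length by omega)]
      simp only [hAfull, List.sum_append]
      rw [ih G hGN (k - L.length - E.length)]
      have hEsum : E.sum = (E.length : Int) * p := by
        rw [hErep, List.sum_replicate, nsmul_eq_mul]
        simp
      rw [show (k - (L.length : Int) - (E.length : Int)).toNat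
          = k.toNat - ((PySem.List.sorted L (fun x => x) false) ++ E).length by
        simp only [List.length_append, hlenA]; omega]
      rw [hEsum, hsumA]
      ring

-- min(l) (the first minimal element) has the value of the sorted list's head
lemma min_eq_sorted_head (l : List Int) (h : l ≠ []) :
    (PySem.List.min? l (fun x => x)).getD 0
      = (PySem.List.sorted l (fun x => x) false).getD 0 0 := by
  rcases hs : PySem.List.sorted l (fun x => x) false with _ | ⟨m, t⟩
  · exact absurd ((PySem.List.sorted_eq_nil_iff _ _ _).mp hs) h
  · rcases hm : PySem.List.min? l (fun x => x) with _ | mm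
    · exact absurd ((PySem.List.min?_eq_none_iff _ _).mp hm) h
    · simp only [Option.getD_some, List.getD_cons_zero]
      have h1 : ∀ y ∈ l, m ≤ y := PySem.List.key_head_sorted_le l (fun x => x) hs
      have h2 : ∀ y ∈ l, mm ≤ y := PySem.List.min?_isMin hm
      have hmem_m : m ∈ l := by
        have hmem : m ∈ PySem.List.sorted l (fun x => x) false := by
          rw [hs]; exact List.mem_cons_self
        rwa [PySem.List.mem_sorted] at hmem
      exact le_antisymm (h2 m hmem_m) (h1 mm (PySem.List.min?_mem hm))

-- ===== VERDICT (by name: the statement is the Claim_ definition above) =====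
theorem solve_spec : Claim_equal_solve := by
  intro n l _ hpre
  obtain ⟨hodd, heven⟩ := hpre
  unfold Spec_solve solve solve_alt
  set s := PySem.List.sorted l (fun x => x) false with hs
  have hlen : s.length = l.length := PySem.List.length_sorted l _ _
  have hceil : -(PySem.Int.floordiv (-n) 2) = (n + 1) / 2 := by
    rw [PySem.Int.floordiv_eq_ediv_of_pos (by omega : (0:Int) < 2)]; omega
  by_cases hpar : PySem.Int.mod n 2 = 0
  · -- even n
    have hmod : n % 2 = 0 := by
      rw [PySem.Int.mod_eq_emod_of_pos (by omega : (0:Int) < 2)] at hpar; exact hpar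
    obtain ⟨hn0, hl1, hnl⟩ := heven hmod
    have hM : (PySem.Int.mod n 2 == 0) = true := by rw [hpar]; decide
    have hfd : PySem.Int.floordiv n 2 = n / 2 :=
      PySem.Int.floordiv_eq_ediv_of_pos (by omega)
    have hlne : l ≠ [] := by
      intro hx; subst hx; simp at hl1
    have hB : sumSmallest l (PySem.Int.floordiv n 2 + 1) = (s.take ((n / 2).toNat + 1)).sum := by
      rw [sumSmallest_eq, ← hs, hfd, show (n / 2 + 1).toNat = (n / 2).toNat + 1 by omega]
    have hmin : (PySem.List.min? l (fun x => x)).getD 0 = s.getD 0 0 := by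
      rw [min_eq_sorted_head l hlne, ← hs]
    have hmlt : (n / 2).toNat < s.length := by omega
    have hstep := List.sum_take_succ s ((n / 2).toNat) hmlt
    have h0lt : 0 < s.length := by omega
    by_cases hn : n = 2
    · subst hn
      rw [if_pos (by decide : ((2:Int) == 2) = true), if_pos hM, hB, hmin]
      rw [PySem.List.pyGetD_eq_getElem s (i := 1) 0 (by omega) (by norm_num; omega)]
      have e1 : ((2:Int) / 2).toNat = 1 := rfl
      simp only [e1] at hstep ⊢
      rw [hstep, List.sum_take_succ s 0 h0lt, List.getD_eq_getElem s 0 h0lt]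
      simp
    · have hA2 : ¬ ((n == 2) = true) := by simp [hn]
      rw [if_neg hA2, if_pos hM, if_pos hM]
      rw [hceil, show (n + 1) / 2 = n / 2 by omega]
      rw [loop_eq_sum_take' s (n / 2) (by omega)]
      rw [hB, hmin, hfd]
      rw [PySem.List.pyGetD_eq_getElem s (i := 0) 0 (by omega) (by omega)]
      rw [PySem.List.pyGetD_eq_getElem s (i := n / 2) 0 (by omega) (by omega)]
      rw [hstep]
      rw [List.getD_eq_getElem s 0 h0lt]
      simp only [Int.toNat_zero]
      ring
  · -- odd n
    have hmod : n % 2 = 1 := by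
      rw [PySem.Int.mod_eq_emod_of_pos (by omega : (0:Int) < 2)] at hpar; omega
    have hkl : (n + 1) / 2 ≤ (s.length : Int) := by
      have := hodd hmod; omega
    have hMf : ¬ ((PySem.Int.mod n 2 == 0) = true) := by simpa using hpar
    have hA2 : ¬ ((n == 2) = true) := by
      simp only [beq_iff_eq]
      omega
    have hfd2 : PySem.Int.floordiv (n + 1) 2 = (n + 1) / 2 :=
      PySem.Int.floordiv_eq_ediv_of_pos (by omega)
    rw [if_neg hA2, if_neg hMf, if_neg hMf]
    rw [hceil, loop_eq_sum_take' s ((n + 1) / 2) hkl]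
    rw [sumSmallest_eq, ← hs, hfd2]
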